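-- pv_equiv track=rewrite | github.com/cuthbertLab/music21 | music21/common.py | groupContiguousIntegers
-- ===== SOURCE A (Python) =====
-- def groupContiguousIntegers(src):
--     '''Given a list of integers, group contiguous values into sub lists
--
--
--     >>> common.groupContiguousIntegers([3, 5, 6])
--     [[3], [5, 6]]
--     >>> common.groupContiguousIntegers([3, 4, 6])
--     [[3, 4], [6]]
--     >>> common.groupContiguousIntegers([3, 4, 6, 7])
--     [[3, 4], [6, 7]]
--     >>> common.groupContiguousIntegers([3, 4, 6, 7, 20])
--     [[3, 4], [6, 7], [20]]
--     >>> common.groupContiguousIntegers([3, 4, 5, 6, 7])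
--     [[3, 4, 5, 6, 7]]
--     >>> common.groupContiguousIntegers([3])
--     [[3]]
--     >>> common.groupContiguousIntegers([3, 200])
--     [[3], [200]]
--     '''
--     if len(src) <= 1:
--         return [src]
--     post = []
--     group = []
--     src.sort()
--     i = 0
--     while i < (len(src)-1):
--         e = src[i]
--         group.append(e)
--         eNext = src[i+1]
--         # if next is contiguous, add to grou
--         if eNext != e + 1:
--         # if not contiguous
--             post.append(group)
--             group = []
--         # second to last elements; handle separately
--         if i == len(src)-2:
--             # need to handle next elements
--             group.append(eNext)
--             post.append(group)
--
--         i += 1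
--
--     return post
-- ===== SOURCE B (Python) =====
-- def groupContiguousIntegers(src):
--     if len(src) <= 1:
--         return [src]
--     src.sort()
--     cuts = [0] + [i for i, (x, y) in enumerate(zip(src, src[1:]), 1) if y != x + 1] + [len(src)]
--     return [src[a:b] for a, b in zip(cuts, cuts[1:])]
-- ===== Notes on version B (the rewrite author's own statement) =====
-- stated objective: alternative
-- what changed: Replaces A's element-by-element while loop that accumulates a running group with a two-phase decomposition: first compute the boundary cut indices (via enumerate over adjacent pairs), then build the result by slicing the sorted list between consecutive cuts.
import Mathlib
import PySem

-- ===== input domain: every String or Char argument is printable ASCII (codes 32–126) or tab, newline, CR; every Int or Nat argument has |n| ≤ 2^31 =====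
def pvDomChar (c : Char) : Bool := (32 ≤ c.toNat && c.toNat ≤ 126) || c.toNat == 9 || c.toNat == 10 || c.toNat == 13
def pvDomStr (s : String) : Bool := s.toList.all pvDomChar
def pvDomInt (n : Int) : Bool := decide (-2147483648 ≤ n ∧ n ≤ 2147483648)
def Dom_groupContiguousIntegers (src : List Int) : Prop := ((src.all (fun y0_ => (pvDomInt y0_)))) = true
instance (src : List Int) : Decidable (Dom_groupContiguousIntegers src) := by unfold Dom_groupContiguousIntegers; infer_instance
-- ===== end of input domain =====

-- B replaces A's element-by-element while-loop accumulation by computing the boundary cut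
-- indices once and slicing the sorted list between consecutive cuts (objective: alternative
-- decomposition). Both A and B sort `src` in place in Python; the equivalence proved here is
-- about the RETURN value.

-- ===== PORT A =====
-- the while loop of A: state (post, group), counter i; indices are always in range, so
-- pyGetD with default 0 is exact here
def aLoop (s : List Int) (post : List (List Int)) (group : List Int) (i : Nat) : List (List Int) :=
  if i < s.length - 1 then
    let e := PySem.List.pyGetD s (i : Int) 0
    let group1 := group ++ [e]
    let eNext := PySem.List.pyGetD s ((i : Int) + 1) 0
    let post1 := if eNext ≠ e + 1 then post ++ [group1] else post
    let group2 := if eNext ≠ e + 1 then ([] : List Int) else group1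
    let post2 := if i = s.length - 2 then post1 ++ [group2 ++ [eNext]] else post1
    aLoop s post2 group2 (i + 1)
  else post
termination_by s.length - i

def groupContiguousIntegers (src : List Int) : List (List Int) :=
  if src.length ≤ 1 then [src]
  else
    let s := PySem.List.sorted src (fun x => x) false
    aLoop s [] [] 0

-- ===== PORT B =====
def groupContiguousIntegers_alt (src : List Int) : List (List Int) :=
  if src.length ≤ 1 then [src]
  else
    let s := PySem.List.sorted src (fun x => x) false
    let cuts : List Int :=
      0 :: (((PySem.List.enumerate (s.zip (PySem.List.slice s (some 1) none)) 1).filter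
               (fun p => p.2.2 != p.2.1 + 1)).map (fun p => p.1)
            ++ [(s.length : Int)])
    (cuts.zip cuts.tail).map (fun p => PySem.List.slice s (some p.1) (some p.2))

-- ===== PRECONDITION & SPEC =====
def Spec_groupContiguousIntegers (src : List Int) (out : List (List Int)) : Prop := out = groupContiguousIntegers_alt src
instance (src : List Int) (out : List (List Int)) : Decidable (Spec_groupContiguousIntegers src out) := by unfold Spec_groupContiguousIntegers; infer_instance

-- ===== CLAIM (what is proved, stated in full; the proofs are below) =====
def Claim_equal_groupContiguousIntegers : Prop := ∀ (src : List Int), Dom_groupContiguousIntegers src → Spec_groupContiguousIntegers src (groupContiguousIntegers src)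

-- ===== LEMMAS AND PROOFS =====

-- canonical recursive grouping of a list into maximal contiguous runs
def runsR : List Int → List (List Int)
  | [] => []
  | [x] => [[x]]
  | x :: y :: r =>
    if y = x + 1 then
      match runsR (y :: r) with
      | g :: rest => (x :: g) :: rest
      | [] => []
    else [x] :: runsR (y :: r)

-- what A's loop appends while consuming the suffix, carrying a partial group
def consume (group : List Int) : List Int → List (List Int)
  | [] => []
  | [x] => [group ++ [x]]
  | x :: y :: r => if y ≠ x + 1 then (group ++ [x]) :: consume [] (y :: r)
                   else consume (group ++ [x]) (y :: r)

-- Nat-level boundary indices (B's comprehension) and cut list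
def EN (k : Nat) : List Int → List Nat
  | [] => []
  | [_] => []
  | x :: y :: r => if y = x + 1 then EN (k + 1) (y :: r) else k :: EN (k + 1) (y :: r)

def cutsN (m : Nat) (t : List Int) : List Nat := m :: (EN (m + 1) t ++ [m + t.length])

def sliceMap (s : List Int) (c : List Nat) : List (List Int) :=
  (c.zip c.tail).map (fun p => (s.drop p.1).take (p.2 - p.1))

theorem runsR_cons (x : Int) (r : List Int) : ∃ h t, runsR (x :: r) = (x :: h) :: t := by
  induction r generalizing x with
  | nil => exact ⟨[], [], rfl⟩
  | cons y r ih =>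
    obtain ⟨h, t, hy⟩ := ih y
    by_cases hc : y = x + 1
    · subst hc
      exact ⟨(x + 1) :: h, t, by simp [runsR, hy]⟩
    · exact ⟨[], runsR (y :: r), by simp [runsR, hc]⟩

theorem consume_runs (t : List Int) : ∀ (g h : List Int) (rest : List (List Int)),
    runsR t = h :: rest → consume g t = (g ++ h) :: rest := by
  induction t with
  | nil => intro g h rest hr; simp [runsR] at hr
  | cons x t ih =>
    intro g h rest hr
    cases t with
    | nil => simp [runsR] at hr; simp [consume, hr]
    | cons y r =>
      by_cases hc : y = x + 1
      · subst hc
        obtain ⟨h', t', hy⟩ := runsR_cons (x + 1) r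
        simp [runsR, hy] at hr
        have hco := ih (g ++ [x]) ((x + 1) :: h') t' hy
        simp [consume, hco, ← hr.1, ← hr.2]
      · simp [runsR, hc] at hr
        obtain ⟨h', t', hy⟩ := runsR_cons y r
        have hco := ih [] ((y) :: h') t' hy
        simp [consume, hc, hco, hy, ← hr.1, ← hr.2]

theorem EN_ge (t : List Int) : ∀ (k n : Nat), n ∈ EN k t → k ≤ n := by
  induction t with
  | nil => intro k n h; simp [EN] at h
  | cons x t ih =>
    intro k n h
    cases t with
    | nil => simp [EN] at h
    | cons y r =>
      by_cases hc : y = x + 1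
      · subst hc
        simp [EN] at h
        exact Nat.le_of_succ_le (ih (k + 1) n h)
      · simp [EN, hc] at h
        rcases h with h | h
        · omega
        · exact Nat.le_of_succ_le (ih (k + 1) n h)

theorem sliceMap_cons (s : List Int) (a b : Nat) (rest : List Nat) :
    sliceMap s (a :: b :: rest) = (s.drop a).take (b - a) :: sliceMap s (b :: rest) := rfl

theorem sliceMap_eq_runsR (t : List Int) : ∀ (m : Nat) (s : List Int),
    s.drop m = t → t ≠ [] → sliceMap s (cutsN m t) = runsR t := by
  induction t with
  | nil => intro m s _ hne; exact absurd rfl hne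
  | cons x t ih =>
    intro m s hdrop _
    have hdrop1 : s.drop (m + 1) = t := by
      have h1 : s.drop (m + 1) = (s.drop m).drop 1 := by rw [List.drop_drop]
      rw [h1, hdrop]; rfl
    cases t with
    | nil =>
      have h1 : cutsN m [x] = m :: (m + 1) :: [] := by
        unfold cutsN; simp [EN]
      rw [h1, sliceMap_cons]
      have h2 : m + 1 - m = 1 := by omega
      rw [h2, hdrop]
      rfl
    | cons y r =>
      have hend1 : m + (x :: y :: r).length = m + 2 + r.length := by simp; omega
      have hend2 : m + 1 + (y :: r).length = m + 2 + r.length := by simp; omega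
      have hcuts2 : cutsN (m + 1) (y :: r) = (m + 1) :: (EN (m + 2) (y :: r) ++ [m + 2 + r.length]) := by
        unfold cutsN; rw [hend2]
      have hIH := ih (m + 1) s hdrop1 (by simp)
      by_cases hc : y = x + 1
      · subst hc
        have hEN : EN (m + 1) (x :: (x + 1) :: r) = EN (m + 2) ((x + 1) :: r) := by
          simp [EN]
        have hcuts1 : cutsN m (x :: (x + 1) :: r) = m :: (EN (m + 2) ((x + 1) :: r) ++ [m + 2 + r.length]) := by
          unfold cutsN; rw [hEN, hend1]
        rcases hL : EN (m + 2) ((x + 1) :: r) ++ [m + 2 + r.length] with _ | ⟨c1, L'⟩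
        · simp at hL
        · have hc1 : m + 2 ≤ c1 := by
            rcases hE : EN (m + 2) ((x + 1) :: r) with _ | ⟨n, ns⟩
            · rw [hE] at hL; simp at hL; omega
            · rw [hE] at hL; simp at hL
              have := EN_ge ((x + 1) :: r) (m + 2) n (by rw [hE]; simp)
              omega
          obtain ⟨g, gs, hr⟩ := runsR_cons (x + 1) r
          rw [hcuts2, hL, sliceMap_cons, hr] at hIH
          obtain ⟨hg, hgs⟩ := List.cons_eq_cons.mp hIH
          rw [hcuts1, hL, sliceMap_cons, hgs]
          have hruns : runsR (x :: (x + 1) :: r) = (x :: (x + 1) :: g) :: gs := by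
            simp [runsR, hr]
          rw [hruns]
          have hdm : s.drop m = x :: s.drop (m + 1) := by rw [hdrop, hdrop1]
          have htake : (s.drop m).take (c1 - m) = x :: (s.drop (m + 1)).take (c1 - (m + 1)) := by
            rw [hdm]
            have h3 : c1 - m = (c1 - (m + 1)) + 1 := by omega
            rw [h3, List.take_succ_cons]
          rw [htake, hg]
      · have hEN : EN (m + 1) (x :: y :: r) = (m + 1) :: EN (m + 2) (y :: r) := by
          simp [EN, hc]
        have hcuts1 : cutsN m (x :: y :: r) = m :: (m + 1) :: (EN (m + 2) (y :: r) ++ [m + 2 + r.length]) := by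
          unfold cutsN; rw [hEN, hend1]; rfl
        rw [hcuts1, sliceMap_cons, ← hcuts2, hIH]
        have h2 : m + 1 - m = 1 := by omega
        have h4 : (s.drop m).take 1 = [x] := by rw [hdrop]; rfl
        rw [h2, h4]
        simp [runsR, hc]

-- A's loop, characterised by consume on the remaining suffix
theorem aLoop_eq (r : List Int) : ∀ (i : Nat) (x y : Int) (s : List Int),
    s.drop i = x :: y :: r → ∀ (post : List (List Int)) (group : List Int),
    aLoop s post group i = post ++ consume group (x :: y :: r) := by
  induction r with
  | nil =>
    intro i x y s hdrop post group
    have hlen : s.length = i + 2 := by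
      have h1 := List.length_drop (l := s) (i := i)
      rw [hdrop] at h1; simp at h1; omega
    have hx : PySem.List.pyGetD s (i : Int) 0 = x := by
      rw [PySem.List.pyGetD_natCast]
      have h0 : s[i]? = some x := by
        have h0 := congrArg (fun l : List Int => l[0]?) hdrop
        simpa [List.getElem?_drop] using h0
      simp [List.getD_eq_getElem?_getD, h0]
    have hy' : PySem.List.pyGetD s ((i : Int) + 1) 0 = y := by
      have hcast : (i : Int) + 1 = ((i + 1 : Nat) : Int) := by push_cast; ring
      rw [hcast, PySem.List.pyGetD_natCast]
      have h1 : s[i + 1]? = some y := by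
        have h1 := congrArg (fun l : List Int => l[1]?) hdrop
        simpa [List.getElem?_drop] using h1
      simp [List.getD_eq_getElem?_getD, h1]
    rw [aLoop]
    simp only [hx, hy', hlen]
    rw [if_pos (by omega), if_pos (by omega)]
    rw [aLoop]
    rw [if_neg (by omega)]
    by_cases hc : y = x + 1
    · simp [consume, hc]
    · simp [consume, hc]
  | cons z r ih =>
    intro i x y s hdrop post group
    have hlen : s.length = i + (3 + r.length) := by
      have h1 := List.length_drop (l := s) (i := i)
      rw [hdrop] at h1; simp at h1; omega
    have hx : PySem.List.pyGetD s (i : Int) 0 = x := by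
      rw [PySem.List.pyGetD_natCast]
      have h0 : s[i]? = some x := by
        have h0 := congrArg (fun l : List Int => l[0]?) hdrop
        simpa [List.getElem?_drop] using h0
      simp [List.getD_eq_getElem?_getD, h0]
    have hy' : PySem.List.pyGetD s ((i : Int) + 1) 0 = y := by
      have hcast : (i : Int) + 1 = ((i + 1 : Nat) : Int) := by push_cast; ring
      rw [hcast, PySem.List.pyGetD_natCast]
      have h1 : s[i + 1]? = some y := by
        have h1 := congrArg (fun l : List Int => l[1]?) hdrop
        simpa [List.getElem?_drop] using h1
      simp [List.getD_eq_getElem?_getD, h1]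
    have hdrop1 : s.drop (i + 1) = y :: z :: r := by
      have : s.drop (i + 1) = (s.drop i).drop 1 := by rw [List.drop_drop]
      rw [this, hdrop]; rfl
    rw [aLoop]
    simp only [hx, hy', hlen]
    rw [if_pos (by omega), if_neg (by omega)]
    by_cases hc : y = x + 1
    · rw [if_neg (by simp [hc]), if_neg (by simp [hc])]
      rw [ih (i + 1) y z s hdrop1 post (group ++ [x])]
      simp [consume, hc]
    · rw [if_pos (by simp [hc]), if_pos (by simp [hc])]
      rw [ih (i + 1) y z s hdrop1 (post ++ [group ++ [x]]) []]
      simp [consume, hc]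

theorem EN_bridge (t : List Int) : ∀ (k : Nat),
    ((PySem.List.enumerate (t.zip t.tail) (k : Int)).filter
      (fun p => p.2.2 != p.2.1 + 1)).map (fun p => p.1)
    = (EN k t).map (fun n : Nat => (n : Int)) := by
  induction t with
  | nil => intro k; simp [EN, PySem.List.enumerate_nil]
  | cons a t ihb =>
    intro k
    cases t with
    | nil => simp [EN, PySem.List.enumerate_nil]
    | cons b r' =>
      have hz : (a :: b :: r').zip (a :: b :: r').tail
          = (a, b) :: ((b :: r').zip (b :: r').tail) := by rfl
      rw [hz, PySem.List.enumerate_cons]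
      have hk1 : (k : Int) + 1 = ((k + 1 : Nat) : Int) := by push_cast; ring
      by_cases hcb : b = a + 1
      · simp only [List.filter_cons]
        rw [if_neg (by simp [hcb])]
        rw [hk1, ihb (k + 1)]
        simp [EN, hcb]
      · simp only [List.filter_cons]
        rw [if_pos (by simp [hcb])]
        rw [List.map_cons, hk1, ihb (k + 1)]
        simp [EN, hcb]

theorem zipmap_slice (s : List Int) (c : List Nat) :
    (((c.map (fun n : Nat => (n : Int))).zip ((c.map (fun n : Nat => (n : Int))).tail)).map
      (fun p => PySem.List.slice s (some p.1) (some p.2))) = sliceMap s c := by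
  induction c with
  | nil => rfl
  | cons a c ih =>
    cases c with
    | nil => rfl
    | cons b c' =>
      have hstep : sliceMap s (a :: b :: c') = (s.drop a).take (b - a) :: sliceMap s (b :: c') := rfl
      rw [hstep, ← ih]
      simp only [List.map_cons, List.tail_cons, List.zip_cons_cons]
      rw [PySem.List.slice_natCast]

-- ===== VERDICT (by name: the statement is the Claim_ definition above) =====
theorem groupContiguousIntegers_spec : Claim_equal_groupContiguousIntegers := by
  intro src _
  unfold Spec_groupContiguousIntegers
  by_cases hlen : src.length ≤ 1
  · unfold groupContiguousIntegers groupContiguousIntegers_alt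
    rw [if_pos hlen, if_pos hlen]
  · obtain ⟨x, y, r, hsc⟩ : ∃ x y r, PySem.List.sorted src (fun x => x) false = x :: y :: r := by
      have hslen : 2 ≤ (PySem.List.sorted src (fun x => x) false).length := by
        rw [PySem.List.length_sorted]; omega
      rcases hq : PySem.List.sorted src (fun x => x) false with _ | ⟨x, _ | ⟨y, r⟩⟩
      · rw [hq] at hslen; simp at hslen
      · rw [hq] at hslen; simp at hslen
      · exact ⟨x, y, r, rfl⟩
    obtain ⟨h, t, hr⟩ := runsR_cons x (y :: r)
    have hA : groupContiguousIntegers src = runsR (x :: y :: r) := by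
      unfold groupContiguousIntegers
      rw [if_neg hlen]
      simp only [hsc]
      rw [aLoop_eq r 0 x y (x :: y :: r) (by rfl) [] []]
      rw [consume_runs (x :: y :: r) [] (x :: h) t hr, hr]
      simp
    have hB : groupContiguousIntegers_alt src = runsR (x :: y :: r) := by
      unfold groupContiguousIntegers_alt
      rw [if_neg hlen]
      simp only [hsc, PySem.List.slice_from_one]
      have hb := EN_bridge (x :: y :: r) 1
      simp only [Nat.cast_one] at hb
      rw [hb]
      have hcuts : (0 : Int) :: ((EN 1 (x :: y :: r)).map (fun n : Nat => (n : Int))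
              ++ [((x :: y :: r).length : Int)])
          = (cutsN 0 (x :: y :: r)).map (fun n : Nat => (n : Int)) := by
        simp [cutsN]
      rw [hcuts, zipmap_slice]
      exact sliceMap_eq_runsR (x :: y :: r) 0 (x :: y :: r) (by simp) (by simp)
    rw [hA, hB]
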